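-- pv_equiv track=rewrite | github.com/yacanka/aw-center | backend/dcc/views.py | classify_dcc
-- ===== SOURCE A (Python) =====
-- def classify_dcc(classification_list):
--     priority_map = {
--         "Major": 1,
--         "Minor-Additional Work": 2,
--         "Minor-No Effect": 3
--     }
--
--     dominant = None
--     for classification in classification_list:
--         priority = priority_map.get(classification[0], None)
--         if priority:
--             if dominant is None or priority < priority_map[dominant[0]]:
--                 dominant = classification
--
--     if dominant:
--         return dominant[0], dominant[1]
--     return None, None
-- ===== SOURCE B (Python) =====
-- def classify_dcc(classification_list):
--     priority_map = {
--         "Major": 1,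
--         "Minor-Additional Work": 2,
--         "Minor-No Effect": 3
--     }
--     candidates = [c for c in classification_list if c[0] in priority_map]
--     if not candidates:
--         return None, None
--     best = sorted(candidates, key=lambda c: priority_map[c[0]])[0]
--     return best[0], best[1]
-- ===== Notes on version B (the rewrite author's own statement) =====
-- stated objective: alternative
-- what changed: Replaces the single-pass strict-min scan with filter-then-stable-sort-by-priority and take the head, relying on sort stability for A's keep-first tie-breaking.
import Mathlib
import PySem

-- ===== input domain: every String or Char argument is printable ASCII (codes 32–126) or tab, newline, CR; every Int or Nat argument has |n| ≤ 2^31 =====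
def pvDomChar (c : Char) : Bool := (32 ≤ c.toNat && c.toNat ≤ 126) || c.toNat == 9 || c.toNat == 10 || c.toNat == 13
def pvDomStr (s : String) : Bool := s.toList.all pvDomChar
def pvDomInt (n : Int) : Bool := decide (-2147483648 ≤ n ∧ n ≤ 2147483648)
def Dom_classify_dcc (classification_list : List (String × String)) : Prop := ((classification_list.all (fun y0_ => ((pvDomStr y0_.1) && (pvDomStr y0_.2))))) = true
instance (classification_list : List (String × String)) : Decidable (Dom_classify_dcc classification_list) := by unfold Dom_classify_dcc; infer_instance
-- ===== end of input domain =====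

-- B replaces A's strict-min scan by filter + stable sort on priority + head; same return value, no speed claim.

-- the priority map both programs build (insertion order of the Python dict literal)
def dccPriorityMap : PySem.Dict String Int :=
  PySem.Dict.ofList [("Major", (1 : Int)), ("Minor-Additional Work", (2 : Int)), ("Minor-No Effect", (3 : Int))]

-- ===== PORT A =====
-- 'if priority:' is faithful as a match on get?: every value in the map is nonzero.
-- 'priority_map[dominant[0]]' is ported as get? + getD 0; the key is always present
-- (dominant only ever holds keys of the map), so the default is never read.
def classify_dcc (classification_list : List (String × String)) : Option String × Option String :=
  let dominant := classification_list.foldl (fun d c =>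
    match PySem.Dict.get? dccPriorityMap c.1 with
    | none => d
    | some p =>
      match d with
      | none => some c
      | some d0 => if p < (PySem.Dict.get? dccPriorityMap d0.1).getD 0 then some c else d) none
  match dominant with
  | none => (none, none)
  | some d => (some d.1, some d.2)

-- ===== PORT B =====
def classify_dcc_alt (classification_list : List (String × String)) : Option String × Option String :=
  let candidates := classification_list.filter (fun c => (PySem.Dict.get? dccPriorityMap c.1).isSome)
  match PySem.List.sorted candidates (fun c => (PySem.Dict.get? dccPriorityMap c.1).getD 0) false with
  | [] => (none, none)
  | best :: _ => (some best.1, some best.2)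

-- ===== PRECONDITION & SPEC =====
def Spec_classify_dcc (classification_list : List (String × String)) (out : Option String × Option String) : Prop := out = classify_dcc_alt classification_list
instance (classification_list : List (String × String)) (out : Option String × Option String) : Decidable (Spec_classify_dcc classification_list out) := by unfold Spec_classify_dcc; infer_instance

-- ===== CLAIM (what is proved, stated in full; the proofs are below) =====
def Claim_equal_classify_dcc : Prop := ∀ (classification_list : List (String × String)), Dom_classify_dcc classification_list → Spec_classify_dcc classification_list (classify_dcc classification_list)

-- ===== LEMMAS AND PROOFS =====

-- the key both programs order by
def dccKey (c : String × String) : Int := (PySem.Dict.get? dccPriorityMap c.1).getD 0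

-- A's strict-min step, on candidates only
def dccStep (d : Option (String × String)) (c : String × String) : Option (String × String) :=
  match d with
  | none => some c
  | some d0 => if dccKey c < dccKey d0 then some c else d

lemma head?_insertBy (x : String × String) (ys : List (String × String)) :
    (PySem.List.insertBy (fun a b => decide (dccKey a < dccKey b)) x ys).head? = dccStep ys.head? x := by
  cases ys with
  | nil => simp [PySem.List.insertBy, dccStep]
  | cons y t =>
    simp only [PySem.List.insertBy, dccStep, List.head?_cons]
    by_cases h : dccKey x < dccKey y <;> simp [h]

lemma foldl_step_eq_head?_insert (cs : List (String × String)) :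
    ∀ acc : List (String × String),
      cs.foldl dccStep acc.head? =
        (cs.foldl (fun a x => PySem.List.insertBy (fun a b => decide (dccKey a < dccKey b)) x a) acc).head? := by
  induction cs with
  | nil => intro acc; rfl
  | cons c t ih =>
    intro acc
    have := ih (PySem.List.insertBy (fun a b => decide (dccKey a < dccKey b)) c acc)
    simpa [List.foldl_cons, head?_insertBy] using this

lemma dominant_eq_sorted_head (l : List (String × String)) :
    l.foldl (fun d c =>
      match PySem.Dict.get? dccPriorityMap c.1 with
      | none => d
      | some p =>
        match d with
        | none => some c
        | some d0 => if p < (PySem.Dict.get? dccPriorityMap d0.1).getD 0 then some c else d) none =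
    (PySem.List.sorted (l.filter (fun c => (PySem.Dict.get? dccPriorityMap c.1).isSome))
      (fun c => (PySem.Dict.get? dccPriorityMap c.1).getD 0) false).head? := by
  have hk : (fun c : String × String => (PySem.Dict.get? dccPriorityMap c.1).getD 0) = dccKey := rfl
  rw [hk, PySem.List.sorted_eq_foldl_insertBy]
  rw [← foldl_step_eq_head?_insert _ []]
  rw [List.foldl_filter]
  apply PySem.List.foldl_congr_mem
  intro d c _
  cases h : PySem.Dict.get? dccPriorityMap c.1 with
  | none => simp
  | some p => simp [h, dccStep, dccKey]

-- ===== VERDICT (by name: the statement is the Claim_ definition above) =====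
theorem classify_dcc_spec : Claim_equal_classify_dcc := by
  intro l _
  unfold Spec_classify_dcc classify_dcc classify_dcc_alt
  show (match l.foldl (fun d c =>
      match PySem.Dict.get? dccPriorityMap c.1 with
      | none => d
      | some p =>
        match d with
        | none => some c
        | some d0 => if p < (PySem.Dict.get? dccPriorityMap d0.1).getD 0 then some c else d) none with
    | none => ((none : Option String), (none : Option String))
    | some d => (some d.1, some d.2)) =
    (match PySem.List.sorted (l.filter (fun c => (PySem.Dict.get? dccPriorityMap c.1).isSome))
        (fun c => (PySem.Dict.get? dccPriorityMap c.1).getD 0) false with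
    | [] => (none, none)
    | best :: _ => (some best.1, some best.2))
  rw [dominant_eq_sorted_head]
  cases PySem.List.sorted (l.filter (fun c => (PySem.Dict.get? dccPriorityMap c.1).isSome))
      (fun c => (PySem.Dict.get? dccPriorityMap c.1).getD 0) false with
  | nil => rfl
  | cons b t => rfl
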